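-- pv_equiv track=rewrite | github.com/1r0nw1ll/quantum-arithmetic-research | qa_alphageometry_ptolemy/qa_fuller_ve_diagonal_decomposition_cert_v1/qa_fuller_ve_diagonal_decomposition_cert_validate.py | sibling_diagonal_candidates
-- ===== SOURCE A (Python) =====
-- def odd_divisors(n):
--     """Odd divisors of n > 0, sorted ascending."""
--     out = []
--     for k in range(1, n + 1):
--         if k % 2 == 1 and n % k == 0:
--             out.append(k)
--     return out
--
-- def sibling_diagonal_candidates(a):
--     """For off-D_1 a, return list of (k, b) such that a = (2k+1) * b, k >= 1."""
--     out = []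
--     for r in odd_divisors(a):
--         if r >= 3:  # 2k+1 >= 3  <=>  k >= 1
--             k = (r - 1) // 2
--             b = a // r
--             out.append((k, b))
--     return out
-- ===== SOURCE B (Python) =====
-- def sibling_diagonal_candidates(a):
--     """For off-D_1 a, return list of (k, b) such that a = (2k+1) * b, k >= 1."""
--     divs = []
--     i = 1
--     while i * i <= a:
--         if a % i == 0:
--             divs.append(i)
--             if a // i != i:
--                 divs.append(a // i)
--         i += 1
--     return [((r - 1) // 2, a // r) for r in sorted(divs) if r % 2 == 1 and r >= 3]
-- ===== Notes on version B (the rewrite author's own statement) =====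
-- stated objective: faster
-- what changed: B enumerates divisor pairs (i, a//i) only up to sqrt(a) and sorts them, instead of A's full scan of 1..a, then filters odd divisors >= 3 in one comprehension.
import Mathlib
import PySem

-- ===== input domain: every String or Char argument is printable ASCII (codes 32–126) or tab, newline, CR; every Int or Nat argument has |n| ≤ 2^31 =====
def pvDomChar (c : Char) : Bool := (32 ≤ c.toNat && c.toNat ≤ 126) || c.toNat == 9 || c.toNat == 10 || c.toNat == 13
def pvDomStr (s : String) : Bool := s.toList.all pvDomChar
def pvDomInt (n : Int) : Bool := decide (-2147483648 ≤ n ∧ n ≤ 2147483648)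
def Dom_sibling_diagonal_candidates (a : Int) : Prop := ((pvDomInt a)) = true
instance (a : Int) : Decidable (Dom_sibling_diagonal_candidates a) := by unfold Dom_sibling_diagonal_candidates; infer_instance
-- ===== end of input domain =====

-- B replaces A's full scan 1..a by divisor-pair enumeration up to sqrt(a) plus a sort (objective: faster).

-- ===== PORT A =====
-- odd_divisors(n): scan k = 1..n, keep odd divisors
def odd_divisors (n : Int) : List Int :=
  (PySem.List.pyRange 1 (n + 1) 1).foldl
    (fun out k => if PySem.Int.mod k 2 = 1 ∧ PySem.Int.mod n k = 0 then out ++ [k] else out) []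

def sibling_diagonal_candidates (a : Int) : List (Int × Int) :=
  (odd_divisors a).foldl
    (fun out r => if r ≥ 3 then
        out ++ [(PySem.Int.floordiv (r - 1) 2, PySem.Int.floordiv a r)]
      else out) []

-- ===== PORT B =====
-- while i*i <= a: collect i and a//i when i divides a (guard 1 ≤ i only makes the recursion total; entry is i = 1)
def collectDivs (a : Int) (i : Int) : List Int :=
  if h : i * i ≤ a ∧ 1 ≤ i then
    (if PySem.Int.mod a i = 0 then
       i :: (if PySem.Int.floordiv a i ≠ i then [PySem.Int.floordiv a i] else [])
     else []) ++ collectDivs a (i + 1)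
  else []
termination_by (a + 1 - i).toNat
decreasing_by
  have : i ≤ a := le_trans (by nlinarith [h.2] : i ≤ i * i) h.1
  omega

def sibling_diagonal_candidates_alt (a : Int) : List (Int × Int) :=
  ((PySem.List.sorted (collectDivs a 1) (fun x => x) false).filter
      (fun r => decide (PySem.Int.mod r 2 = 1 ∧ r ≥ 3))).map
    (fun r => (PySem.Int.floordiv (r - 1) 2, PySem.Int.floordiv a r))

-- ===== PRECONDITION & SPEC =====
def Spec_sibling_diagonal_candidates (a : Int) (out : List (Int × Int)) : Prop := out = sibling_diagonal_candidates_alt a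
instance (a : Int) (out : List (Int × Int)) : Decidable (Spec_sibling_diagonal_candidates a out) := by unfold Spec_sibling_diagonal_candidates; infer_instance

-- ===== CLAIM (what is proved, stated in full; the proofs are below) =====
def Claim_equal_sibling_diagonal_candidates : Prop := ∀ (a : Int), Dom_sibling_diagonal_candidates a → Spec_sibling_diagonal_candidates a (sibling_diagonal_candidates a)

-- ===== LEMMAS AND PROOFS =====

-- membership in B's collected divisor list
theorem mem_collectDivs (a : Int) (i x : Int) (hi : 1 ≤ i) :
    x ∈ collectDivs a i ↔
      ∃ m, i ≤ m ∧ m * m ≤ a ∧ m ∣ a ∧ (x = m ∨ (x = a / m ∧ a / m ≠ m)) := by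
  induction i using collectDivs.induct a with
  | case1 i h ih =>
      have hip : (0:Int) < i := h.2
      have ihx := ih (by omega)
      rw [collectDivs, dif_pos h]
      simp only [List.mem_append, ihx]
      rw [PySem.Int.floordiv_eq_ediv_of_pos hip]
      constructor
      · rintro (hc | ⟨m, hm1, hm2, hm3, hm4⟩)
        · by_cases hd : PySem.Int.mod a i = 0
          · rw [if_pos hd] at hc
            have hdvd : i ∣ a := (PySem.Int.mod_eq_zero_iff_dvd a i).1 hd
            refine ⟨i, le_refl i, h.1, hdvd, ?_⟩
            rcases List.mem_cons.1 hc with h1 | h2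
            · exact Or.inl h1
            · by_cases he : a / i ≠ i
              · rw [if_pos he] at h2; simp only [List.mem_singleton] at h2
                exact Or.inr ⟨h2, he⟩
              · rw [if_neg he] at h2; simp at h2
          · rw [if_neg hd] at hc; simp at hc
        · exact ⟨m, by omega, hm2, hm3, hm4⟩
      · rintro ⟨m, hm1, hm2, hm3, hm4⟩
        by_cases hmi : m = i
        · subst hmi
          left
          have hd : PySem.Int.mod a m = 0 := (PySem.Int.mod_eq_zero_iff_dvd a m).2 hm3
          rw [if_pos hd]
          rcases hm4 with h1 | ⟨h1, h2⟩
          · exact h1 ▸ List.mem_cons_self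
          · subst h1; rw [if_pos h2]; simp
        · exact Or.inr ⟨m, by omega, hm2, hm3, hm4⟩
  | case2 i h =>
      rw [collectDivs, dif_neg h]
      simp only [List.not_mem_nil, false_iff]
      rintro ⟨m, hm1, hm2, -, -⟩
      have hia : ¬ i * i ≤ a := fun hc => h ⟨hc, hi⟩
      nlinarith

-- B's collected divisor list has no duplicates
theorem nodup_collectDivs (a : Int) (i : Int) (hi : 1 ≤ i) : (collectDivs a i).Nodup := by
  induction i using collectDivs.induct a with
  | case1 i h ih =>
      have hip : (0:Int) < i := h.2
      have ha1 : (1:Int) ≤ a := le_trans (by nlinarith : (1:Int) ≤ i * i) h.1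
      rw [collectDivs, dif_pos h, List.nodup_append]
      refine ⟨?_, ih (by omega), ?_⟩
      · by_cases hd : PySem.Int.mod a i = 0
        · rw [if_pos hd]
          by_cases he : PySem.Int.floordiv a i ≠ i
          · rw [if_pos he]; simp [Ne.symm he]
          · rw [if_neg he]; simp
        · rw [if_neg hd]; simp
      · intro x hx y hy
        by_cases hd : PySem.Int.mod a i = 0
        · rw [if_pos hd] at hx
          have hdvd : i ∣ a := (PySem.Int.mod_eq_zero_iff_dvd a i).1 hd
          have hai : a / i * i = a := Int.ediv_mul_cancel hdvd
          obtain ⟨m, hm1, hm2, hm3, hm4⟩ := (mem_collectDivs a (i+1) y (by omega)).1 hy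
          have hmp : (0:Int) < m := by omega
          have ham : a / m * m = a := Int.ediv_mul_cancel hm3
          rw [PySem.Int.floordiv_eq_ediv_of_pos hip] at hx
          have hx' : x = i ∨ x = a / i := by
            rcases List.mem_cons.1 hx with h1 | h2
            · exact Or.inl h1
            · by_cases he : a / i ≠ i
              · rw [if_pos he] at h2; simp only [List.mem_singleton] at h2; exact Or.inr h2
              · rw [if_neg he] at h2; simp at h2
          rcases hm4 with rfl | ⟨rfl, hne⟩
          · -- y = m
            rcases hx' with rfl | rfl
            · intro hxy; omega
            · intro hxy
              -- a / i = m ⇒ a = m * i ⇒ m*m ≤ m*i ⇒ m ≤ i, contra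
              rw [hxy] at hai
              nlinarith
          · -- y = a / m
            rcases hx' with rfl | rfl
            · intro hxy
              rw [← hxy] at ham
              nlinarith
            · intro hxy
              -- a / i = a / m =: t, a = t*i = t*m, t ≠ 0 ⇒ i = m, contra
              have h1 : a / i * i = a / i * m := by
                calc a / i * i = a := hai
                _ = a / m * m := ham.symm
                _ = a / i * m := by rw [hxy]
              have ht : a / i ≠ 0 := by
                intro h0; rw [h0] at hai; simp at hai; omega
              have : i = m := mul_left_cancel₀ ht h1
              omega
        · rw [if_neg hd] at hx; simp at hx
  | case2 i h =>
      rw [collectDivs, dif_neg h]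
      exact List.nodup_nil

-- collectDivs a 1 holds exactly the divisors of a in [1, a]
theorem divisor_mem (a x : Int) : x ∈ collectDivs a 1 ↔ x ∣ a ∧ 1 ≤ x ∧ x ≤ a := by
  rw [mem_collectDivs a 1 x (le_refl 1)]
  constructor
  · rintro ⟨m, hm1, hm2, hm3, hm4⟩
    have hmp : (0:Int) < m := hm1
    have ham : m ≤ a := le_trans (by nlinarith) hm2
    have ha1 : (1:Int) ≤ a := le_trans hm1 ham
    rcases hm4 with rfl | ⟨rfl, hne⟩
    · exact ⟨hm3, hm1, ham⟩
    · refine ⟨⟨m, (Int.ediv_mul_cancel hm3).symm⟩, ?_, Int.ediv_le_self m (by omega)⟩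
      rw [Int.le_ediv_iff_mul_le hmp]; omega
  · rintro ⟨hdvd, hx1, hxa⟩
    obtain ⟨y, hy⟩ := hdvd
    have hxp : (0:Int) < x := hx1
    have hyp : (0:Int) < y := by nlinarith
    by_cases hxx : x * x ≤ a
    · exact ⟨x, hx1, hxx, ⟨y, hy⟩, Or.inl rfl⟩
    · rw [not_le] at hxx
      have hylt : y < x := by nlinarith
      have hyy : y * y ≤ a := by nlinarith
      have hay : a / y = x := by rw [hy, Int.mul_ediv_cancel _ (by omega)]
      exact ⟨y, hyp, hyy, ⟨x, by rw [hy]; ring⟩, Or.inr ⟨hay.symm, by rw [hay]; omega⟩⟩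

-- the sorted collected list is exactly A's ascending divisor scan
theorem sorted_collectDivs (a : Int) :
    PySem.List.sorted (collectDivs a 1) (fun x => x) false
      = (PySem.List.pyRange 1 (a + 1) 1).filter (fun k => decide (PySem.Int.mod a k = 0)) := by
  apply PySem.List.sorted_eq_of_perm_of_pairwise_lt
  · rw [List.perm_ext_iff_of_nodup
        (List.Nodup.filter _ (PySem.List.nodup_pyRange_one 1 (a+1)))
        (nodup_collectDivs a 1 (le_refl 1))]
    intro x
    rw [List.mem_filter, PySem.List.mem_pyRange_one, divisor_mem]
    simp only [decide_eq_true_eq, PySem.Int.mod_eq_zero_iff_dvd]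
    constructor
    · rintro ⟨⟨h1, h2⟩, h3⟩; exact ⟨h3, h1, by omega⟩
    · rintro ⟨h1, h2, h3⟩; exact ⟨⟨h2, by omega⟩, h1⟩
  · exact List.Pairwise.filter _ (PySem.List.pairwise_lt_pyRange_one 1 (a+1))

-- Prop-test variant of PySem.List.foldl_append_if
theorem foldl_append_ite {α β : Type} (p : α → Prop) [DecidablePred p] (f : α → β)
    (l : List α) (acc : List β) :
    l.foldl (fun acc x => if p x then acc ++ [f x] else acc) acc
      = acc ++ (l.filter (fun x => decide (p x))).map f := by
  induction l generalizing acc with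
  | nil => simp
  | cons x xs ih => by_cases h : p x <;> simp [h, ih]

-- ===== VERDICT (by name: the statement is the Claim_ definition above) =====
theorem sibling_diagonal_candidates_spec : Claim_equal_sibling_diagonal_candidates := by
  intro a _
  unfold Spec_sibling_diagonal_candidates sibling_diagonal_candidates sibling_diagonal_candidates_alt odd_divisors
  rw [PySem.List.foldl_append_ite_eq_filter (fun k => PySem.Int.mod k 2 = 1 ∧ PySem.Int.mod a k = 0),
      List.nil_append,
      foldl_append_ite (fun r => r ≥ 3)
        (fun r => (PySem.Int.floordiv (r - 1) 2, PySem.Int.floordiv a r)),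
      List.nil_append, sorted_collectDivs, List.filter_filter, List.filter_filter]
  apply congrArg
  apply List.filter_congr
  intro x _
  by_cases h1 : PySem.Int.mod x 2 = 1 <;> by_cases h2 : PySem.Int.mod a x = 0 <;>
    by_cases h3 : (3:Int) ≤ x <;> simp [h2, h3, h1]
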